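-- pv_equiv track=rewrite | github.com/frag2win/city-simulator-desktop | python-sidecar/app/services/schema_normalizer.py | _stitch_ways
-- ===== SOURCE A (Python) =====
-- def _stitch_ways(ways: list) -> list:
--     """Stitch a sequence of way segments into complete rings."""
--     if not ways: return []
--     rings = []
--     pool = list(ways)
--
--     while pool:
--         current_ring = list(pool.pop(0))
--
--         while True:
--             # Reached a closed ring?
--             if current_ring[0] == current_ring[-1] and len(current_ring) > 2:
--                 rings.append(current_ring)
--                 break
--
--             merged = False
--             for i in range(len(pool)):
--                 w = pool[i]
--                 if current_ring[-1] == w[0]: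
--                     current_ring.extend(w[1:])
--                     pool.pop(i)
--                     merged = True
--                     break
--                 elif current_ring[-1] == w[-1]:
--                     current_ring.extend(reversed(w[:-1]))
--                     pool.pop(i)
--                     merged = True
--                     break
--                 elif current_ring[0] == w[-1]:
--                     current_ring = w[:-1] + current_ring
--                     pool.pop(i)
--                     merged = True
--                     break
--                 elif current_ring[0] == w[0]:
--                     current_ring = list(reversed(w[1:])) + current_ring
--                     pool.pop(i)
--                     merged = True
--                     break
--
--             if not merged:
--                 # Close it forcibly if unclosed due to bad mapping
--                 if current_ring[0] != current_ring[-1]: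
--                     current_ring.append(current_ring[0])
--                 rings.append(current_ring)
--                 break
--     return rings
-- ===== SOURCE B (Python) =====
-- def _stitch_ways(ways: list) -> list:
--     """Stitch way segments into rings using an endpoint index (min-index candidate
--     lookup in dicts keyed by coordinate) instead of rescanning the remaining pool."""
--     if not ways:
--         return []
--     n = len(ways)
--     start_at = {}
--     end_at = {}
--     for i, w in enumerate(ways):
--         start_at.setdefault(w[0], []).append(i)
--         end_at.setdefault(w[-1], []).append(i)
--     alive = [True] * n
--
--     def first_alive(idxs):
--         for i in idxs:
--             if alive[i]:
--                 return i
--         return None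
--
--     rings = []
--     for seed in range(n):
--         if not alive[seed]:
--             continue
--         alive[seed] = False
--         ring = list(ways[seed])
--         while True:
--             if ring[0] == ring[-1] and len(ring) > 2:
--                 break
--             first, last = ring[0], ring[-1]
--             cands = (first_alive(start_at.get(last, ())),
--                      first_alive(end_at.get(last, ())),
--                      first_alive(end_at.get(first, ())),
--                      first_alive(start_at.get(first, ())))
--             best = None
--             for c in cands:
--                 if c is not None and (best is None or c < best):
--                     best = c
--             if best is None:
--                 if ring[0] != ring[-1]:
--                     ring.append(ring[0])
--                 break
--             alive[best] = False
--             w = ways[best]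
--             if last == w[0]:
--                 ring.extend(w[1:])
--             elif last == w[-1]:
--                 ring.extend(reversed(w[:-1]))
--             elif first == w[-1]:
--                 ring = w[:-1] + ring
--             else:
--                 ring = list(reversed(w[1:])) + ring
--         rings.append(ring)
--     return rings
-- ===== Notes on version B (the rewrite author's own statement) =====
-- stated objective: alternative
-- what changed: B replaces A's repeated linear rescans of a shrinking pool (pop(0)/pop(i) with a four-way endpoint test per element) by two dicts built once that index segments by start/end coordinate plus an alive mask: each merge step takes the minimum alive index over the four candidate buckets instead of scanning the whole pool, and seeds advance by a cursor instead of popping the list.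
import Mathlib
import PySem

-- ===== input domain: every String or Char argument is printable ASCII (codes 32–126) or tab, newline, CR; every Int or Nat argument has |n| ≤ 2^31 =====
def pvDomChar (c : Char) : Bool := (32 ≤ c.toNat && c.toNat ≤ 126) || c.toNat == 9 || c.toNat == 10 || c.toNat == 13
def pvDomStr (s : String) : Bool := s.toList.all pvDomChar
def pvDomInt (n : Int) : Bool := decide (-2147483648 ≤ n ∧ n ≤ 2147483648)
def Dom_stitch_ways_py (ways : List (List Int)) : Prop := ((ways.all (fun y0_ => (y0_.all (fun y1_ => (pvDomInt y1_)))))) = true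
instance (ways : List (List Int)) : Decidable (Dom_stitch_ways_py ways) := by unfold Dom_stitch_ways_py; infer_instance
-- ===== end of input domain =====

-- B replaces A's rescans of the remaining pool by an endpoint index (dicts keyed by coordinate,
-- min-index candidate lookup over four buckets) with an alive mask instead of list pops.
-- Pre_ excludes inputs containing an empty segment, on which the Python A raises IndexError.
-- Scalar accesses ring[0] / ring[-1] / w[0] / w[-1] are ported as PySem.List.pyGetD _ _ 0 (exact
-- under Pre_, where every segment — hence every ring — is nonempty); w[1:] / w[:-1] /
-- reversed(…) are List.drop 1 / List.dropLast / List.reverse (exact for these nonneg bounds).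

-- ===== PORT A =====

-- inner 'for i in range(len(pool))' scan of A: first pool segment matching one of the four
-- endpoint tests, in pool order, case order as in A; returns (new ring, pool without it)
def scanA (ring : List Int) : List (List Int) → Option (List Int × List (List Int))
  | [] => none
  | w :: rest =>
    if PySem.List.pyGetD ring (-1) 0 = PySem.List.pyGetD w 0 0 then
      some (ring ++ w.drop 1, rest)
    else if PySem.List.pyGetD ring (-1) 0 = PySem.List.pyGetD w (-1) 0 then
      some (ring ++ w.dropLast.reverse, rest)
    else if PySem.List.pyGetD ring 0 0 = PySem.List.pyGetD w (-1) 0 then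
      some (w.dropLast ++ ring, rest)
    else if PySem.List.pyGetD ring 0 0 = PySem.List.pyGetD w 0 0 then
      some ((w.drop 1).reverse ++ ring, rest)
    else
      match scanA ring rest with
      | some rp => some (rp.1, w :: rp.2)
      | none => none

theorem scanA_length {ring : List Int} : ∀ {pool : List (List Int)}
    {rp : List Int × List (List Int)}, scanA ring pool = some rp → rp.2.length < pool.length := by
  intro pool
  induction pool with
  | nil => intro rp h; simp [scanA] at h
  | cons w rest ih =>
    intro rp h
    simp only [scanA] at h
    split_ifs at h with h1 h2 h3 h4
    · cases h; simp
    · cases h; simp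
    · cases h; simp
    · cases h; simp
    · revert h
      match hs : scanA ring rest with
      | none => intro h; cases h
      | some rp' =>
        intro h; cases h
        have := ih hs
        simpa using Nat.succ_lt_succ this

-- A's inner 'while True' loop: grow current_ring until closed or no merge; returns the
-- finished ring and the remaining pool
def growA (ring : List Int) (pool : List (List Int)) : List Int × List (List Int) :=
  if PySem.List.pyGetD ring 0 0 = PySem.List.pyGetD ring (-1) 0 ∧ 2 < ring.length then
    (ring, pool)
  else
    match h : scanA ring pool with
    | some rp => growA rp.1 rp.2
    | none =>
      (if PySem.List.pyGetD ring 0 0 ≠ PySem.List.pyGetD ring (-1) 0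
         then ring ++ [PySem.List.pyGetD ring 0 0] else ring, pool)
termination_by pool.length
decreasing_by exact scanA_length h

theorem growA_pool_le (ring : List Int) (pool : List (List Int)) :
    (growA ring pool).2.length ≤ pool.length := by
  fun_induction growA with
  | case1 => simp
  | case2 ring pool hcl rp h ih => exact le_trans ih (Nat.le_of_lt (scanA_length h))
  | case3 => simp

-- A's outer 'while pool' loop: pop the first segment, grow it, repeat on what is left
def stitch_ways_py (ways : List (List Int)) : List (List Int) :=
  match ways with
  | [] => []
  | w :: rest =>
    let rp := growA w rest
    rp.1 :: stitch_ways_py rp.2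
termination_by ways.length
decreasing_by
  simpa using Nat.lt_succ_of_le (growA_pool_le w rest)

-- ===== PORT B =====

-- Source B first_alive: first index of the bucket that is still alive
def firstAliveB (alive : List Bool) : List Int → Option Int
  | [] => none
  | i :: rest => if PySem.List.pyGetD alive i false then some i else firstAliveB alive rest

-- Source B 'for c in cands: if c is not None and (best is None or c < best): best = c'
def minStep : Option Int → Option Int → Option Int
  | best, none => best
  | none, some c => some c
  | some b, some c => if c < b then some c else some b

-- Source B index-building loop: start_at / end_at dicts, coordinate → indices (in order)
def buildIdx (ways : List (List Int)) :
    PySem.Dict Int (List Int) × PySem.Dict Int (List Int) :=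
  (PySem.List.enumerate ways 0).foldl
    (fun se iw =>
      (se.1.modify (PySem.List.pyGetD iw.2 0 0) [] (· ++ [iw.1]),
       se.2.modify (PySem.List.pyGetD iw.2 (-1) 0) [] (· ++ [iw.1])))
    (PySem.Dict.empty, PySem.Dict.empty)

-- Source B candidate selection: min alive index over the four endpoint buckets
def bestCand (startAt endAt : PySem.Dict Int (List Int)) (alive : List Bool)
    (first last : Int) : Option Int :=
  [firstAliveB alive (startAt.getD last []),
   firstAliveB alive (endAt.getD last []),
   firstAliveB alive (endAt.getD first []),
   firstAliveB alive (startAt.getD first [])].foldl minStep none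

theorem firstAliveB_alive {alive : List Bool} : ∀ {l : List Int} {i : Int},
    firstAliveB alive l = some i → PySem.List.pyGetD alive i false = true := by
  intro l
  induction l with
  | nil => intro i h; simp [firstAliveB] at h
  | cons j rest ih =>
    intro i h
    by_cases hj : PySem.List.pyGetD alive j false = true
    · simp [firstAliveB, hj] at h; exact h ▸ hj
    · simp [firstAliveB, hj] at h; exact ih h

theorem minStep_some {a b : Option Int} {i : Int} (h : minStep a b = some i) :
    a = some i ∨ b = some i := by
  match a, b with
  | x, none => exact Or.inl h
  | none, some c => exact Or.inr h
  | some x, some c =>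
    simp only [minStep] at h
    split_ifs at h <;> [exact Or.inr h; exact Or.inl h]

theorem bestCand_alive {sA eA : PySem.Dict Int (List Int)} {alive : List Bool}
    {f l : Int} {i : Int} (h : bestCand sA eA alive f l = some i) :
    PySem.List.pyGetD alive i false = true := by
  simp only [bestCand, List.foldl] at h
  rcases minStep_some h with h | h
  · rcases minStep_some h with h | h
    · rcases minStep_some h with h | h
      · rcases minStep_some h with h | h
        · simp at h
        · exact firstAliveB_alive h
      · exact firstAliveB_alive h
    · exact firstAliveB_alive h
  · exact firstAliveB_alive h

theorem count_set_lt (l : List Bool) (k : Nat) (h : k < l.length) (hv : l[k] = true) :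
    (l.set k false).count true < l.count true := by
  have hs : l.set k false = l.take k ++ false :: l.drop (k+1) := by
    rw [List.set_eq_take_append_cons_drop]; simp [h]
  have hl : l = l.take k ++ l[k] :: l.drop (k+1) := by
    conv_lhs => rw [← List.take_append_drop k l]
    rw [List.drop_eq_getElem_cons h]
  conv_rhs => rw [hl]
  rw [hs, hv]
  simp [List.count_append]

theorem count_true_pySetD_lt {alive : List Bool} {i : Int}
    (h : PySem.List.pyGetD alive i false = true) :
    (PySem.List.pySetD alive i false).count true < alive.count true := by
  unfold PySem.List.pyGetD PySem.List.pyGet? PySem.List.pySetD PySem.List.pySet? at *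
  cases hk : PySem.List.pyIdx? alive.length i with
  | none => rw [hk] at h; simp at h
  | some k =>
    rw [hk] at h
    simp only [Option.bind_some] at h
    simp only [Option.map_some, Option.getD_some]
    cases hv : alive[k]? with
    | none => rw [hv] at h; simp at h
    | some v =>
      rw [hv] at h
      have hlt : k < alive.length := (List.getElem?_eq_some_iff.mp hv).1
      have : alive[k] = true := by
        have := List.getElem?_eq_getElem hlt
        rw [this] at hv; cases hv; simpa using h
      exact count_set_lt alive k hlt this

-- Source B inner 'while True' loop
def growB (ways : List (List Int)) (startAt endAt : PySem.Dict Int (List Int))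
    (alive : List Bool) (ring : List Int) : List Int × List Bool :=
  if PySem.List.pyGetD ring 0 0 = PySem.List.pyGetD ring (-1) 0 ∧ 2 < ring.length then
    (ring, alive)
  else
    let first := PySem.List.pyGetD ring 0 0
    let last := PySem.List.pyGetD ring (-1) 0
    match h : bestCand startAt endAt alive first last with
    | none => (if first ≠ last then ring ++ [first] else ring, alive)
    | some i =>
      let w := PySem.List.pyGetD ways i []
      let alive' := PySem.List.pySetD alive i false
      if last = PySem.List.pyGetD w 0 0 then
        growB ways startAt endAt alive' (ring ++ w.drop 1)
      else if last = PySem.List.pyGetD w (-1) 0 then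
        growB ways startAt endAt alive' (ring ++ w.dropLast.reverse)
      else if first = PySem.List.pyGetD w (-1) 0 then
        growB ways startAt endAt alive' (w.dropLast ++ ring)
      else
        growB ways startAt endAt alive' ((w.drop 1).reverse ++ ring)
termination_by alive.count true
decreasing_by
  all_goals exact count_true_pySetD_lt (bestCand_alive h)

-- Source B: build the index once, then 'for seed in range(n)' with an alive mask
def stitch_ways_py_alt (ways : List (List Int)) : List (List Int) :=
  match ways with
  | [] => []
  | _ :: _ =>
    let n := ways.length
    let se := buildIdx ways
    let st := (PySem.List.pyRange 0 (n : Int) 1).foldl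
      (fun st seed =>
        if PySem.List.pyGetD st.1 seed false then
          let alive' := PySem.List.pySetD st.1 seed false
          let rb := growB ways se.1 se.2 alive' (PySem.List.pyGetD ways seed [])
          (rb.2, st.2 ++ [rb.1])
        else st)
      (List.replicate n true, ([] : List (List Int)))
    st.2

-- ===== PRECONDITION & SPEC =====
-- Pre_ excludes inputs containing an empty segment: on those the Python A always raises
-- IndexError (current_ring[0] / w[0] on an empty list); it returns normally on all others.
def Pre_stitch_ways_py (ways : List (List Int)) : Prop := ∀ w ∈ ways, w ≠ []
instance (ways : List (List Int)) : Decidable (Pre_stitch_ways_py ways) := by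
  unfold Pre_stitch_ways_py; infer_instance

def pvWitness_stitch_ways_py : List (List Int) := [[1, 2], [2, 3], [3, 1]]

def Spec_stitch_ways_py (ways : List (List Int)) (out : List (List Int)) : Prop :=
  out = stitch_ways_py_alt ways
instance (ways : List (List Int)) (out : List (List Int)) :
    Decidable (Spec_stitch_ways_py ways out) := by unfold Spec_stitch_ways_py; infer_instance

-- ===== CLAIM (what is proved, stated in full; the proofs are below) =====
def Claim_equal_stitch_ways_py : Prop := ∀ (ways : List (List Int)), Dom_stitch_ways_py ways → Pre_stitch_ways_py ways → Spec_stitch_ways_py ways (stitch_ways_py ways)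

-- ===== LEMMAS AND PROOFS =====


-- the four-way endpoint test, in A's order (left-associated like Source B's candidate fold)
def mB (first last : Int) (w : List Int) : Bool :=
  ((decide (last = PySem.List.pyGetD w 0 0) || decide (last = PySem.List.pyGetD w (-1) 0)) ||
      decide (first = PySem.List.pyGetD w (-1) 0)) || decide (first = PySem.List.pyGetD w 0 0)

-- the merged ring both programs build from the matched segment
def stepR (first last : Int) (ring w : List Int) : List Int :=
  if last = PySem.List.pyGetD w 0 0 then ring ++ w.drop 1
  else if last = PySem.List.pyGetD w (-1) 0 then ring ++ w.dropLast.reverse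
  else if first = PySem.List.pyGetD w (-1) 0 then w.dropLast ++ ring
  else (w.drop 1).reverse ++ ring

theorem scanA_spec (ring : List Int) : ∀ pool : List (List Int),
    scanA ring pool =
      (pool.find? (mB (PySem.List.pyGetD ring 0 0) (PySem.List.pyGetD ring (-1) 0))).map
        (fun w => (stepR (PySem.List.pyGetD ring 0 0) (PySem.List.pyGetD ring (-1) 0) ring w,
          pool.eraseP (mB (PySem.List.pyGetD ring 0 0) (PySem.List.pyGetD ring (-1) 0)))) := by
  intro pool
  induction pool with
  | nil => simp [scanA]
  | cons w rest ih =>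
    by_cases h1 : PySem.List.pyGetD ring (-1) 0 = PySem.List.pyGetD w 0 0
    · have hm : mB (PySem.List.pyGetD ring 0 0) (PySem.List.pyGetD ring (-1) 0) w = true := by
        simp [mB, h1]
      rw [List.find?_cons_of_pos hm, List.eraseP_cons_of_pos hm, Option.map_some]
      simp only [scanA]
      rw [if_pos h1]
      simp only [stepR]
      rw [if_pos h1]
    · by_cases h2 : PySem.List.pyGetD ring (-1) 0 = PySem.List.pyGetD w (-1) 0
      · have hm : mB (PySem.List.pyGetD ring 0 0) (PySem.List.pyGetD ring (-1) 0) w = true := by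
          simp [mB, h2]
        rw [List.find?_cons_of_pos hm, List.eraseP_cons_of_pos hm, Option.map_some]
        simp only [scanA]
        rw [if_neg h1, if_pos h2]
        simp only [stepR]
        rw [if_neg h1, if_pos h2]
      · by_cases h3 : PySem.List.pyGetD ring 0 0 = PySem.List.pyGetD w (-1) 0
        · have hm : mB (PySem.List.pyGetD ring 0 0) (PySem.List.pyGetD ring (-1) 0) w = true := by
            simp [mB, h3]
          rw [List.find?_cons_of_pos hm, List.eraseP_cons_of_pos hm, Option.map_some]
          simp only [scanA]
          rw [if_neg h1, if_neg h2, if_pos h3]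
          simp only [stepR]
          rw [if_neg h1, if_neg h2, if_pos h3]
        · by_cases h4 : PySem.List.pyGetD ring 0 0 = PySem.List.pyGetD w 0 0
          · have hm : mB (PySem.List.pyGetD ring 0 0) (PySem.List.pyGetD ring (-1) 0) w = true := by
              simp [mB, h4]
            rw [List.find?_cons_of_pos hm, List.eraseP_cons_of_pos hm, Option.map_some]
            simp only [scanA]
            rw [if_neg h1, if_neg h2, if_neg h3, if_pos h4]
            simp only [stepR]
            rw [if_neg h1, if_neg h2, if_neg h3]
          · have hm : mB (PySem.List.pyGetD ring 0 0) (PySem.List.pyGetD ring (-1) 0) w = false := by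
              simp [mB, h1, h2, h3, h4]
            rw [List.find?_cons_of_neg (by simp [hm]), List.eraseP_cons_of_neg (by simp [hm])]
            simp only [scanA]
            rw [if_neg h1, if_neg h2, if_neg h3, if_neg h4]
            rw [ih]
            cases hf : List.find? (mB (PySem.List.pyGetD ring 0 0) (PySem.List.pyGetD ring (-1) 0)) rest <;> simp

-- getD-characterisation of Source B's setdefault/append index-building fold
theorem buildAux_getD (c : Int) : ∀ (l : List (Int × List Int)) (d e : PySem.Dict Int (List Int)),
    ((l.foldl (fun se iw =>
        (se.1.modify (PySem.List.pyGetD iw.2 0 0) [] (· ++ [iw.1]),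
         se.2.modify (PySem.List.pyGetD iw.2 (-1) 0) [] (· ++ [iw.1]))) (d, e)).1.getD c [] =
      d.getD c [] ++ (l.filter (fun iw => decide (c = PySem.List.pyGetD iw.2 0 0))).map (·.1)) ∧
    ((l.foldl (fun se iw =>
        (se.1.modify (PySem.List.pyGetD iw.2 0 0) [] (· ++ [iw.1]),
         se.2.modify (PySem.List.pyGetD iw.2 (-1) 0) [] (· ++ [iw.1]))) (d, e)).2.getD c [] =
      e.getD c [] ++ (l.filter (fun iw => decide (c = PySem.List.pyGetD iw.2 (-1) 0))).map (·.1)) := by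
  intro l
  induction l with
  | nil => simp
  | cons iw rest ih =>
    intro d e
    rw [List.foldl_cons]
    refine ⟨?_, ?_⟩
    · rw [(ih _ _).1]
      by_cases hc : c = PySem.List.pyGetD iw.2 0 0
      · rw [← hc, PySem.Dict.getD_modify_self]
        simp [hc]
      · rw [PySem.Dict.getD_modify_of_ne _ _ _ hc]
        simp [hc]
    · rw [(ih _ _).2]
      by_cases hc : c = PySem.List.pyGetD iw.2 (-1) 0
      · rw [← hc, PySem.Dict.getD_modify_self]
        simp [hc]
      · rw [PySem.Dict.getD_modify_of_ne _ _ _ hc]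
        simp [hc]

theorem buildIdx_fst_getD (ways : List (List Int)) (c : Int) :
    (buildIdx ways).1.getD c [] =
      ((PySem.List.enumerate ways 0).filter
        (fun iw => decide (c = PySem.List.pyGetD iw.2 0 0))).map (·.1) := by
  unfold buildIdx
  simpa using (buildAux_getD c (PySem.List.enumerate ways 0) PySem.Dict.empty PySem.Dict.empty).1

theorem buildIdx_snd_getD (ways : List (List Int)) (c : Int) :
    (buildIdx ways).2.getD c [] =
      ((PySem.List.enumerate ways 0).filter
        (fun iw => decide (c = PySem.List.pyGetD iw.2 (-1) 0))).map (·.1) := by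
  unfold buildIdx
  simpa using (buildAux_getD c (PySem.List.enumerate ways 0) PySem.Dict.empty PySem.Dict.empty).2

-- first_alive over a bucket (a projected index list) is find? over the pairs
theorem firstAliveB_map (alive : List Bool) : ∀ P : List (Int × List Int),
    firstAliveB alive (P.map (·.1)) =
      (P.find? (fun iw => PySem.List.pyGetD alive iw.1 false)).map (·.1) := by
  intro P
  induction P with
  | nil => simp [firstAliveB]
  | cons iw rest ih =>
    by_cases h : PySem.List.pyGetD alive iw.1 false = true
    · simp [firstAliveB, h, List.find?_cons]
    · have hf : PySem.List.pyGetD alive iw.1 false = false := by simpa using h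
      rw [List.find?_cons_of_neg (by simp [hf])]
      simp [firstAliveB, hf, ih]

theorem minStep_none_left (c : Option Int) : minStep none c = c := by cases c <;> rfl
theorem minStep_some_some (b c : Int) :
    minStep (some b) (some c) = if c < b then some c else some b := rfl

-- min of two first-match indices = first match of the disjunction (indices strictly increasing)
theorem minStep_find? (p q : Int × List Int → Bool) :
    ∀ P : List (Int × List Int), P.Pairwise (fun a b => a.1 < b.1) →
      minStep ((P.find? p).map (·.1)) ((P.find? q).map (·.1)) =
        (P.find? (fun x => p x || q x)).map (·.1) := by
  intro P
  induction P with
  | nil => simp [minStep]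
  | cons x rest ih =>
    intro hpw
    rw [List.pairwise_cons] at hpw
    by_cases hp : p x
    · have hP : List.find? p (x :: rest) = some x := List.find?_cons_of_pos hp
      have hPQ : List.find? (fun y => p y || q y) (x :: rest) = some x :=
        List.find?_cons_of_pos (by simp [hp])
      rw [hP, hPQ]
      cases hq : List.find? q (x :: rest) with
      | none => rfl
      | some e =>
        have he : e ∈ x :: rest := List.mem_of_find?_eq_some hq
        simp only [Option.map_some, minStep_some_some]
        rcases List.mem_cons.mp he with rfl | hmem
        · simp
        · have hlt : x.1 < e.1 := hpw.1 e hmem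
          rw [if_neg (by omega)]
    · by_cases hq : q x
      · have hQ : List.find? q (x :: rest) = some x := List.find?_cons_of_pos hq
        have hPQ : List.find? (fun y => p y || q y) (x :: rest) = some x :=
          List.find?_cons_of_pos (by simp [hp, hq])
        have hP : List.find? p (x :: rest) = List.find? p rest :=
          List.find?_cons_of_neg (by simp [hp])
        rw [hP, hQ, hPQ]
        cases hf : List.find? p rest with
        | none => rfl
        | some e =>
          have hlt : x.1 < e.1 := hpw.1 e (List.mem_of_find?_eq_some hf)
          simp only [Option.map_some, minStep_some_some]
          rw [if_pos (by omega)]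
      · have hP : List.find? p (x :: rest) = List.find? p rest :=
          List.find?_cons_of_neg (by simp [hp])
        have hQ : List.find? q (x :: rest) = List.find? q rest :=
          List.find?_cons_of_neg (by simp [hq])
        have hPQ : List.find? (fun y => p y || q y) (x :: rest) =
            List.find? (fun y => p y || q y) rest := List.find?_cons_of_neg (by simp [hp, hq])
        rw [hP, hQ, hPQ]
        exact ih hpw.2

-- the pool as both sides see it: still-alive (index, segment) pairs, in index order
def liveP (ways : List (List Int)) (alive : List Bool) : List (Int × List Int) :=
  (PySem.List.enumerate ways 0).filter (fun iw => PySem.List.pyGetD alive iw.1 false)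

theorem liveP_pairwise (ways : List (List Int)) (alive : List Bool) :
    (liveP ways alive).Pairwise (fun a b => a.1 < b.1) :=
  (PySem.List.pairwise_lt_enumerate ways 0).filter _

theorem find?_filter' (L : List (Int × List Int)) (p q : Int × List Int → Bool) :
    (L.filter p).find? q = L.find? (fun a => p a && q a) := by
  rw [List.find?_filter]
  congr 1
  funext a
  cases hp : p a <;> cases hq : q a <;> simp [hp, hq]

-- B's candidate selection = first still-alive pool entry passing the four-way test
theorem bestCand_spec (ways : List (List Int)) (alive : List Bool) (f l : Int) :
    bestCand (buildIdx ways).1 (buildIdx ways).2 alive f l =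
      ((liveP ways alive).find? (fun iw => mB f l iw.2)).map (·.1) := by
  unfold bestCand liveP
  simp only [List.foldl]
  rw [minStep_none_left]
  rw [buildIdx_fst_getD ways l, buildIdx_snd_getD ways l, buildIdx_snd_getD ways f,
    buildIdx_fst_getD ways f]
  rw [firstAliveB_map, firstAliveB_map, firstAliveB_map, firstAliveB_map]
  rw [find?_filter', find?_filter', find?_filter', find?_filter', find?_filter']
  rw [minStep_find? _ _ _ (PySem.List.pairwise_lt_enumerate ways 0),
    minStep_find? _ _ _ (PySem.List.pairwise_lt_enumerate ways 0),
    minStep_find? _ _ _ (PySem.List.pairwise_lt_enumerate ways 0)]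
  have hpred : (fun x : Int × List Int =>
      (((decide (l = PySem.List.pyGetD x.2 0 0) && PySem.List.pyGetD alive x.1 false ||
         decide (l = PySem.List.pyGetD x.2 (-1) 0) && PySem.List.pyGetD alive x.1 false) ||
         decide (f = PySem.List.pyGetD x.2 (-1) 0) && PySem.List.pyGetD alive x.1 false) ||
         decide (f = PySem.List.pyGetD x.2 0 0) && PySem.List.pyGetD alive x.1 false)) =
      (fun x : Int × List Int => PySem.List.pyGetD alive x.1 false && mB f l x.2) := by
    funext x
    cases hA : PySem.List.pyGetD alive x.1 false <;> simp [mB, hA]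
  rw [hpred]

-- killing one index: point lookups in the updated alive mask (nonnegative indices)
theorem pyGetD_pySetD_false (alive : List Bool) (i j : Int) (hi : 0 ≤ i)
    (hilen : i < (alive.length : Int)) (hj : 0 ≤ j) :
    PySem.List.pyGetD (PySem.List.pySetD alive i false) j false =
      (PySem.List.pyGetD alive j false && !(j == i)) := by
  rw [PySem.List.pySetD_of_nonneg alive false hi]
  unfold PySem.List.pyGetD PySem.List.pyGet? PySem.List.pyIdx?
  rw [List.length_set]
  by_cases hji : j = i
  · subst hji
    simp only [if_pos hj, if_pos hilen, Option.bind_some]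
    rw [List.getElem?_set]
    have : j.toNat < alive.length := by omega
    simp [this]
  · simp only [if_pos hj]
    by_cases hjl : j < (alive.length : Int)
    · simp only [if_pos hjl, Option.bind_some]
      rw [List.getElem?_set_ne (by omega)]
      simp [hji]
    · simp [hjl]

-- dead indices stay dead through pySetD
theorem pyGetD_pySetD_dead (alive : List Bool) (i j : Int)
    (h : PySem.List.pyGetD alive j false = false) :
    PySem.List.pyGetD (PySem.List.pySetD alive i false) j false = false := by
  unfold PySem.List.pyGetD PySem.List.pyGet? PySem.List.pySetD PySem.List.pySet? at *
  cases hk : PySem.List.pyIdx? alive.length i with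
  | none => simpa [hk] using h
  | some k =>
    simp only [hk, Option.map_some, Option.getD_some, List.length_set]
    cases hm : PySem.List.pyIdx? alive.length j with
    | none => simp
    | some m =>
      rw [hm] at h
      simp only [Option.bind_some] at h ⊢
      by_cases hkm : k = m
      · subst hkm
        rw [List.getElem?_set, if_pos rfl]
        split <;> rfl
      · rw [List.getElem?_set_ne hkm]
        exact h

-- removing the first match: filtering out its index = eraseP (indices strictly increasing)
theorem filter_ne_eq_eraseP {P : Int × List Int → Bool} :
    ∀ {L : List (Int × List Int)} {e : Int × List Int},
      L.Pairwise (fun a b => a.1 < b.1) → L.find? P = some e →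
      L.filter (fun x => !(x.1 == e.1)) = L.eraseP P := by
  intro L
  induction L with
  | nil => intro e _ h; simp at h
  | cons x rest ih =>
    intro e hpw hfind
    rw [List.pairwise_cons] at hpw
    by_cases hx : P x
    · rw [List.find?_cons_of_pos hx] at hfind
      cases hfind
      rw [List.eraseP_cons_of_pos hx, List.filter_cons_of_neg (by simp)]
      exact List.filter_eq_self.mpr (fun a ha => by
        have := hpw.1 a ha
        simp; omega)
    · rw [List.find?_cons_of_neg (by simp [hx])] at hfind
      have he : e ∈ rest := List.mem_of_find?_eq_some hfind
      have hne : x.1 ≠ e.1 := by have := hpw.1 e he; omega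
      rw [List.eraseP_cons_of_neg (by simp [hx]), List.filter_cons_of_pos (by simp [hne])]
      rw [ih hpw.2 hfind]

-- liveP after killing the first matching index = eraseP of the match on the old pool
theorem liveP_kill (ways : List (List Int)) (alive : List Bool) (P : Int × List Int → Bool)
    (hlen : alive.length = ways.length) {e : Int × List Int}
    (hfind : (liveP ways alive).find? P = some e) :
    liveP ways (PySem.List.pySetD alive e.1 false) = (liveP ways alive).eraseP P := by
  have hmem : e ∈ liveP ways alive := List.mem_of_find?_eq_some hfind
  have hmem' : e ∈ PySem.List.enumerate ways 0 := List.mem_of_mem_filter hmem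
  obtain ⟨k, hk, hke⟩ := (PySem.List.mem_enumerate_iff ways 0 e).mp hmem'
  have he1 : e.1 = (k : Int) := by rw [hke]; simp
  have h0e : 0 ≤ e.1 := by rw [he1]; positivity
  have helen : e.1 < (alive.length : Int) := by rw [he1, hlen]; exact_mod_cast hk
  unfold liveP
  have hstep : (PySem.List.enumerate ways 0).filter
      (fun iw => PySem.List.pyGetD (PySem.List.pySetD alive e.1 false) iw.1 false) =
      ((PySem.List.enumerate ways 0).filter (fun iw => PySem.List.pyGetD alive iw.1 false)).filter
        (fun iw => !(iw.1 == e.1)) := by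
    rw [List.filter_filter]
    exact List.filter_congr (fun a ha => by
      obtain ⟨m, hm, hma⟩ := (PySem.List.mem_enumerate_iff ways 0 a).mp ha
      have ha1 : 0 ≤ a.1 := by rw [hma]; positivity
      rw [pyGetD_pySetD_false alive e.1 a.1 h0e helen ha1]
      exact Bool.and_comm _ _)
  rw [hstep]
  exact filter_ne_eq_eraseP (liveP_pairwise ways alive) hfind

theorem growA_closed {ring : List Int} {pool : List (List Int)}
    (h : PySem.List.pyGetD ring 0 0 = PySem.List.pyGetD ring (-1) 0 ∧ 2 < ring.length) :
    growA ring pool = (ring, pool) := by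
  rw [growA.eq_def, if_pos h]

theorem growA_step {ring : List Int} {pool : List (List Int)} {rp : List Int × List (List Int)}
    (hcl : ¬(PySem.List.pyGetD ring 0 0 = PySem.List.pyGetD ring (-1) 0 ∧ 2 < ring.length))
    (h : scanA ring pool = some rp) : growA ring pool = growA rp.1 rp.2 := by
  rw [growA.eq_def, if_neg hcl]
  split
  next rp' heq => rw [h] at heq; cases heq; rfl
  next heq => rw [h] at heq; cases heq

theorem growA_stop {ring : List Int} {pool : List (List Int)}
    (hcl : ¬(PySem.List.pyGetD ring 0 0 = PySem.List.pyGetD ring (-1) 0 ∧ 2 < ring.length))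
    (h : scanA ring pool = none) :
    growA ring pool = (if PySem.List.pyGetD ring 0 0 ≠ PySem.List.pyGetD ring (-1) 0
      then ring ++ [PySem.List.pyGetD ring 0 0] else ring, pool) := by
  rw [growA.eq_def, if_neg hcl]
  split
  next rp' heq => rw [h] at heq; cases heq
  next heq => rfl

-- scanA over the live pool, phrased through liveP
theorem scanA_liveP (ways : List (List Int)) (alive : List Bool) (ring : List Int) :
    scanA ring ((liveP ways alive).map (·.2)) =
      ((liveP ways alive).find? (fun iw =>
          mB (PySem.List.pyGetD ring 0 0) (PySem.List.pyGetD ring (-1) 0) iw.2)).map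
        (fun e => (stepR (PySem.List.pyGetD ring 0 0) (PySem.List.pyGetD ring (-1) 0) ring e.2,
          ((liveP ways alive).eraseP (fun iw =>
            mB (PySem.List.pyGetD ring 0 0) (PySem.List.pyGetD ring (-1) 0) iw.2)).map (·.2))) := by
  rw [scanA_spec, List.find?_map, List.eraseP_map, Option.map_map]
  rfl

-- the found entry is the segment B reads back from ways
theorem find?_liveP_entry (ways : List (List Int)) (alive : List Bool)
    (P : Int × List Int → Bool) {e : Int × List Int}
    (hfind : (liveP ways alive).find? P = some e) :
    0 ≤ e.1 ∧ e.1 < (ways.length : Int) ∧ PySem.List.pyGetD ways e.1 [] = e.2 := by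
  have hmem : e ∈ liveP ways alive := List.mem_of_find?_eq_some hfind
  have hmem' : e ∈ PySem.List.enumerate ways 0 := List.mem_of_mem_filter hmem
  obtain ⟨k, hk, hke⟩ := (PySem.List.mem_enumerate_iff ways 0 e).mp hmem'
  have he1 : e.1 = (k : Int) := by rw [hke]; simp
  refine ⟨by rw [he1]; positivity, by rw [he1]; exact_mod_cast hk, ?_⟩
  rw [he1, PySem.List.pyGetD_natCast, List.getD_eq_getElem _ _ hk, hke]

-- A's grow loop on the live pool tracks B's grow loop exactly
theorem grow_eq (ways : List (List Int)) (alive : List Bool) (ring : List Int) :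
    alive.length = ways.length →
    growA ring ((liveP ways alive).map (·.2)) =
      ((growB ways (buildIdx ways).1 (buildIdx ways).2 alive ring).1,
        (liveP ways (growB ways (buildIdx ways).1 (buildIdx ways).2 alive ring).2).map (·.2)) := by
  fun_induction growB ways (buildIdx ways).1 (buildIdx ways).2 alive ring with
  | case1 alive ring hcl =>
    intro hlen
    rw [growA_closed hcl]
  | case2 alive ring hcl first last hbc =>
    intro hlen
    rw [bestCand_spec] at hbc
    have hfind := Option.map_eq_none_iff.mp hbc
    have hscan : scanA ring ((liveP ways alive).map (·.2)) = none := by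
      rw [scanA_liveP, hfind]; rfl
    rw [growA_stop hcl hscan]
  | case3 alive ring hcl first last i hbc w alive' hc1 ih =>
    intro hlen
    rw [bestCand_spec] at hbc
    obtain ⟨e, hfind, hei⟩ := Option.map_eq_some_iff.mp hbc
    obtain ⟨he0, helen', hew⟩ := find?_liveP_entry ways alive _ hfind
    have hwe : w = e.2 := by rw [show w = PySem.List.pyGetD ways i [] from rfl, ← hei, hew]
    have hae : alive' = PySem.List.pySetD alive e.1 false := by
      rw [show alive' = PySem.List.pySetD alive i false from rfl, hei]
    have hscan : scanA ring ((liveP ways alive).map (·.2)) =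
        some (stepR (PySem.List.pyGetD ring 0 0) (PySem.List.pyGetD ring (-1) 0) ring e.2,
          ((liveP ways alive).eraseP (fun iw =>
            mB (PySem.List.pyGetD ring 0 0) (PySem.List.pyGetD ring (-1) 0) iw.2)).map (·.2)) := by
      rw [scanA_liveP, hfind]; rfl
    rw [growA_step hcl hscan]
    rw [← liveP_kill ways alive _ hlen hfind, ← hae]
    have hstep : stepR (PySem.List.pyGetD ring 0 0) (PySem.List.pyGetD ring (-1) 0) ring e.2 =
        ring ++ List.drop 1 w := by
      have hc1' : PySem.List.pyGetD ring (-1) 0 = PySem.List.pyGetD e.2 0 0 := by rw [← hwe]; exact hc1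
      rw [stepR, if_pos hc1', hwe]
    rw [hstep]
    exact ih (by rw [show alive' = PySem.List.pySetD alive i false from rfl,
      PySem.List.length_pySetD]; exact hlen)
  | case4 alive ring hcl first last i hbc w alive' hc1 hc2 ih =>
    intro hlen
    rw [bestCand_spec] at hbc
    obtain ⟨e, hfind, hei⟩ := Option.map_eq_some_iff.mp hbc
    obtain ⟨he0, helen', hew⟩ := find?_liveP_entry ways alive _ hfind
    have hwe : w = e.2 := by rw [show w = PySem.List.pyGetD ways i [] from rfl, ← hei, hew]
    have hae : alive' = PySem.List.pySetD alive e.1 false := by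
      rw [show alive' = PySem.List.pySetD alive i false from rfl, hei]
    have hscan : scanA ring ((liveP ways alive).map (·.2)) =
        some (stepR (PySem.List.pyGetD ring 0 0) (PySem.List.pyGetD ring (-1) 0) ring e.2,
          ((liveP ways alive).eraseP (fun iw =>
            mB (PySem.List.pyGetD ring 0 0) (PySem.List.pyGetD ring (-1) 0) iw.2)).map (·.2)) := by
      rw [scanA_liveP, hfind]; rfl
    rw [growA_step hcl hscan]
    rw [← liveP_kill ways alive _ hlen hfind, ← hae]
    have hstep : stepR (PySem.List.pyGetD ring 0 0) (PySem.List.pyGetD ring (-1) 0) ring e.2 =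
        ring ++ w.dropLast.reverse := by
      have hc1' : ¬PySem.List.pyGetD ring (-1) 0 = PySem.List.pyGetD e.2 0 0 := by rw [← hwe]; exact hc1
      have hc2' : PySem.List.pyGetD ring (-1) 0 = PySem.List.pyGetD e.2 (-1) 0 := by rw [← hwe]; exact hc2
      rw [stepR, if_neg hc1', if_pos hc2', hwe]
    rw [hstep]
    exact ih (by rw [show alive' = PySem.List.pySetD alive i false from rfl,
      PySem.List.length_pySetD]; exact hlen)
  | case5 alive ring hcl first last i hbc w alive' hc1 hc2 hc3 ih =>
    intro hlen
    rw [bestCand_spec] at hbc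
    obtain ⟨e, hfind, hei⟩ := Option.map_eq_some_iff.mp hbc
    obtain ⟨he0, helen', hew⟩ := find?_liveP_entry ways alive _ hfind
    have hwe : w = e.2 := by rw [show w = PySem.List.pyGetD ways i [] from rfl, ← hei, hew]
    have hae : alive' = PySem.List.pySetD alive e.1 false := by
      rw [show alive' = PySem.List.pySetD alive i false from rfl, hei]
    have hscan : scanA ring ((liveP ways alive).map (·.2)) =
        some (stepR (PySem.List.pyGetD ring 0 0) (PySem.List.pyGetD ring (-1) 0) ring e.2,
          ((liveP ways alive).eraseP (fun iw =>
            mB (PySem.List.pyGetD ring 0 0) (PySem.List.pyGetD ring (-1) 0) iw.2)).map (·.2)) := by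
      rw [scanA_liveP, hfind]; rfl
    rw [growA_step hcl hscan]
    rw [← liveP_kill ways alive _ hlen hfind, ← hae]
    have hstep : stepR (PySem.List.pyGetD ring 0 0) (PySem.List.pyGetD ring (-1) 0) ring e.2 =
        w.dropLast ++ ring := by
      have hc1' : ¬PySem.List.pyGetD ring (-1) 0 = PySem.List.pyGetD e.2 0 0 := by rw [← hwe]; exact hc1
      have hc2' : ¬PySem.List.pyGetD ring (-1) 0 = PySem.List.pyGetD e.2 (-1) 0 := by rw [← hwe]; exact hc2
      have hc3' : PySem.List.pyGetD ring 0 0 = PySem.List.pyGetD e.2 (-1) 0 := by rw [← hwe]; exact hc3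
      rw [stepR, if_neg hc1', if_neg hc2', if_pos hc3', hwe]
    rw [hstep]
    exact ih (by rw [show alive' = PySem.List.pySetD alive i false from rfl,
      PySem.List.length_pySetD]; exact hlen)
  | case6 alive ring hcl first last i hbc w alive' hc1 hc2 hc3 ih =>
    intro hlen
    rw [bestCand_spec] at hbc
    obtain ⟨e, hfind, hei⟩ := Option.map_eq_some_iff.mp hbc
    obtain ⟨he0, helen', hew⟩ := find?_liveP_entry ways alive _ hfind
    have hwe : w = e.2 := by rw [show w = PySem.List.pyGetD ways i [] from rfl, ← hei, hew]
    have hae : alive' = PySem.List.pySetD alive e.1 false := by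
      rw [show alive' = PySem.List.pySetD alive i false from rfl, hei]
    have hscan : scanA ring ((liveP ways alive).map (·.2)) =
        some (stepR (PySem.List.pyGetD ring 0 0) (PySem.List.pyGetD ring (-1) 0) ring e.2,
          ((liveP ways alive).eraseP (fun iw =>
            mB (PySem.List.pyGetD ring 0 0) (PySem.List.pyGetD ring (-1) 0) iw.2)).map (·.2)) := by
      rw [scanA_liveP, hfind]; rfl
    rw [growA_step hcl hscan]
    rw [← liveP_kill ways alive _ hlen hfind, ← hae]
    have hstep : stepR (PySem.List.pyGetD ring 0 0) (PySem.List.pyGetD ring (-1) 0) ring e.2 =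
        (List.drop 1 w).reverse ++ ring := by
      have hc1' : ¬PySem.List.pyGetD ring (-1) 0 = PySem.List.pyGetD e.2 0 0 := by rw [← hwe]; exact hc1
      have hc2' : ¬PySem.List.pyGetD ring (-1) 0 = PySem.List.pyGetD e.2 (-1) 0 := by rw [← hwe]; exact hc2
      have hc3' : ¬PySem.List.pyGetD ring 0 0 = PySem.List.pyGetD e.2 (-1) 0 := by rw [← hwe]; exact hc3
      rw [stepR, if_neg hc1', if_neg hc2', if_neg hc3', hwe]
    rw [hstep]
    exact ih (by rw [show alive' = PySem.List.pySetD alive i false from rfl,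
      PySem.List.length_pySetD]; exact hlen)

theorem growB_length (ways : List (List Int)) (sA eA : PySem.Dict Int (List Int))
    (alive : List Bool) (ring : List Int) :
    (growB ways sA eA alive ring).2.length = alive.length := by
  fun_induction growB ways sA eA alive ring with
  | case1 => rfl
  | case2 => rfl
  | case3 alive ring hcl first last i hbc w alive' hc1 ih =>
    rw [ih]; exact PySem.List.length_pySetD alive i false
  | case4 alive ring hcl first last i hbc w alive' hc1 hc2 ih =>
    rw [ih]; exact PySem.List.length_pySetD alive i false
  | case5 alive ring hcl first last i hbc w alive' hc1 hc2 hc3 ih =>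
    rw [ih]; exact PySem.List.length_pySetD alive i false
  | case6 alive ring hcl first last i hbc w alive' hc1 hc2 hc3 ih =>
    rw [ih]; exact PySem.List.length_pySetD alive i false

theorem growB_dead_mono (ways : List (List Int)) (sA eA : PySem.Dict Int (List Int))
    (alive : List Bool) (ring : List Int) (j : Int)
    (hj : PySem.List.pyGetD alive j false = false) :
    PySem.List.pyGetD (growB ways sA eA alive ring).2 j false = false := by
  fun_induction growB ways sA eA alive ring with
  | case1 => exact hj
  | case2 => exact hj
  | case3 alive ring hcl first last i hbc w alive' hc1 ih =>
    exact ih (pyGetD_pySetD_dead alive i j hj)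
  | case4 alive ring hcl first last i hbc w alive' hc1 hc2 ih =>
    exact ih (pyGetD_pySetD_dead alive i j hj)
  | case5 alive ring hcl first last i hbc w alive' hc1 hc2 hc3 ih =>
    exact ih (pyGetD_pySetD_dead alive i j hj)
  | case6 alive ring hcl first last i hbc w alive' hc1 hc2 hc3 ih =>
    exact ih (pyGetD_pySetD_dead alive i j hj)

theorem liveP_nil (ways : List (List Int)) (alive : List Bool)
    (hdead : ∀ j : Nat, j < ways.length → PySem.List.pyGetD alive (j : Int) false = false) :
    liveP ways alive = [] := by
  unfold liveP
  rw [List.filter_eq_nil_iff]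
  intro a ha
  obtain ⟨k, hk, hka⟩ := (PySem.List.mem_enumerate_iff ways 0 a).mp ha
  have : a.1 = (k : Int) := by rw [hka]; simp
  rw [this, hdead k hk]
  simp

theorem liveP_head (ways : List (List Int)) (alive : List Bool) (s : Nat)
    (hlen : alive.length = ways.length) (hs : s < ways.length)
    (hdead : ∀ j : Nat, j < s → PySem.List.pyGetD alive (j : Int) false = false)
    (halive : PySem.List.pyGetD alive (s : Int) false = true) :
    liveP ways alive =
      ((s : Int), ways[s]) :: liveP ways (PySem.List.pySetD alive (s : Int) false) := by
  have hs0 : (0 : Int) ≤ (s : Int) := by positivity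
  have hslen : (s : Int) < (alive.length : Int) := by rw [hlen]; exact_mod_cast hs
  have htk : (ways.take s).length = s := by simp; omega
  have hsplit : PySem.List.enumerate ways 0 =
      PySem.List.enumerate (ways.take s) 0 ++
        PySem.List.enumerate (ways.drop s) ((s : Int)) := by
    conv_lhs => rw [← List.take_append_drop s ways]
    rw [PySem.List.enumerate_append, htk]
    norm_num
  have hfront : ∀ (al : List Bool), (∀ j : Nat, j < s → PySem.List.pyGetD al (j : Int) false = false) →
      (PySem.List.enumerate (ways.take s) 0).filter (fun iw => PySem.List.pyGetD al iw.1 false) = [] := by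
    intro al hd
    rw [List.filter_eq_nil_iff]
    intro a ha
    obtain ⟨k, hk, hka⟩ := (PySem.List.mem_enumerate_iff (ways.take s) 0 a).mp ha
    have hks : k < s := by rw [htk] at hk; exact hk
    have : a.1 = (k : Int) := by rw [hka]; simp
    rw [this, hd k hks]
    simp
  have hdead' : ∀ j : Nat, j < s →
      PySem.List.pyGetD (PySem.List.pySetD alive (s : Int) false) (j : Int) false = false :=
    fun j hj => pyGetD_pySetD_dead alive (s : Int) (j : Int) (hdead j hj)
  have hdrop : ways.drop s = ways[s] :: ways.drop (s + 1) := List.drop_eq_getElem_cons hs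
  unfold liveP
  rw [hsplit, List.filter_append, List.filter_append, hfront alive hdead,
    hfront _ hdead', hdrop, PySem.List.enumerate_cons, List.filter_cons, List.filter_cons]
  have hnew : PySem.List.pyGetD (PySem.List.pySetD alive (s : Int) false) (s : Int) false = false := by
    rw [pyGetD_pySetD_false alive (s : Int) (s : Int) hs0 hslen hs0]
    simp
  rw [halive, hnew]
  have htail : (PySem.List.enumerate (ways.drop (s+1)) ((s:Int)+1)).filter
      (fun iw => PySem.List.pyGetD (PySem.List.pySetD alive (s:Int) false) iw.1 false) =
      (PySem.List.enumerate (ways.drop (s+1)) ((s:Int)+1)).filter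
      (fun iw => PySem.List.pyGetD alive iw.1 false) := by
    apply List.filter_congr
    intro a ha
    obtain ⟨k, hk, hka⟩ := (PySem.List.mem_enumerate_iff (ways.drop (s+1)) ((s:Int)+1) a).mp ha
    have ha1 : a.1 = (s : Int) + 1 + (k : Int) := by rw [hka]
    rw [pyGetD_pySetD_false alive (s : Int) a.1 hs0 hslen (by omega)]
    have hne : (a.1 == (s : Int)) = false := by
      simp only [beq_eq_false_iff_ne, ne_eq]
      omega
    rw [hne]
    simp
  rw [htail]
  simp

theorem stitchA_cons (w : List Int) (rest : List (List Int)) :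
    stitch_ways_py (w :: rest) = (growA w rest).1 :: stitch_ways_py (growA w rest).2 := by
  rw [stitch_ways_py]

-- Source B's seed loop from position s, on a mask that is dead below s, produces exactly
-- the rings A's outer loop produces on the corresponding live pool
theorem seed_loop (ways : List (List Int)) : ∀ (fuel s : Nat) (alive : List Bool)
    (rings : List (List Int)),
    ways.length - s = fuel →
    alive.length = ways.length →
    (∀ j : Nat, j < s → PySem.List.pyGetD alive (j : Int) false = false) →
    ((PySem.List.pyRange (s : Int) (ways.length : Int) 1).foldl
      (fun st seed =>
        if PySem.List.pyGetD st.1 seed false then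
          ((growB ways (buildIdx ways).1 (buildIdx ways).2 (PySem.List.pySetD st.1 seed false)
              (PySem.List.pyGetD ways seed [])).2,
            st.2 ++ [(growB ways (buildIdx ways).1 (buildIdx ways).2
              (PySem.List.pySetD st.1 seed false) (PySem.List.pyGetD ways seed [])).1])
        else st) (alive, rings)).2 =
      rings ++ stitch_ways_py ((liveP ways alive).map (·.2)) := by
  intro fuel
  induction fuel with
  | zero =>
    intro s alive rings hf hlen hdead
    have hsn : ways.length ≤ s := by omega
    rw [PySem.List.pyRange_one_eq_nil (by exact_mod_cast hsn)]
    rw [liveP_nil ways alive (fun j hj => hdead j (lt_of_lt_of_le hj hsn))]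
    simp [stitch_ways_py]
  | succ fuel ih =>
    intro s alive rings hf hlen hdead
    have hs : s < ways.length := by omega
    rw [PySem.List.pyRange_one_cons (by exact_mod_cast hs), List.foldl_cons]
    have hcast : ((s : Int) + 1) = (((s + 1 : Nat)) : Int) := by push_cast; ring
    have hgw : PySem.List.pyGetD ways (s : Int) [] = ways[s] := by
      rw [PySem.List.pyGetD_natCast, List.getD_eq_getElem _ _ hs]
    by_cases hal : PySem.List.pyGetD alive (s : Int) false = true
    · rw [if_pos hal]
      have hlen' : (PySem.List.pySetD alive (s : Int) false).length = ways.length := by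
        rw [PySem.List.length_pySetD]; exact hlen
      have hgrow := grow_eq ways (PySem.List.pySetD alive (s : Int) false) ways[s] hlen'
      have hdead2 : ∀ j : Nat, j < s + 1 →
          PySem.List.pyGetD (growB ways (buildIdx ways).1 (buildIdx ways).2
            (PySem.List.pySetD alive (s : Int) false) (PySem.List.pyGetD ways (s : Int) [])).2
            (j : Int) false = false := by
        intro j hj
        apply growB_dead_mono
        by_cases hjs : j = s
        · subst hjs
          rw [pyGetD_pySetD_false alive (j : Int) (j : Int) (by positivity)
            (by rw [hlen]; exact_mod_cast hs) (by positivity)]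
          simp
        · exact pyGetD_pySetD_dead alive _ _ (hdead j (by omega))
      have hlen2 : (growB ways (buildIdx ways).1 (buildIdx ways).2
          (PySem.List.pySetD alive (s : Int) false) (PySem.List.pyGetD ways (s : Int) [])).2.length =
          ways.length := by
        rw [growB_length]; exact hlen'
      rw [hcast, ih (s + 1) _ _ (by omega) hlen2 hdead2]
      rw [liveP_head ways alive s hlen hs hdead hal, List.map_cons, stitchA_cons]
      rw [hgw] at *
      rw [hgrow]
      simp
    · rw [if_neg (by simpa using hal)]
      have hdead1 : ∀ j : Nat, j < s + 1 → PySem.List.pyGetD alive (j : Int) false = false := by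
        intro j hj
        by_cases hjs : j = s
        · subst hjs; simpa using hal
        · exact hdead j (by omega)
      rw [hcast, ih (s + 1) alive rings (by omega) hlen hdead1]

-- initially every index is alive: the live pool is ways itself
theorem liveP_replicate (ways : List (List Int)) :
    (liveP ways (List.replicate ways.length true)).map (·.2) = ways := by
  unfold liveP
  rw [List.filter_eq_self.mpr, PySem.List.map_snd_enumerate]
  intro a ha
  obtain ⟨k, hk, hka⟩ := (PySem.List.mem_enumerate_iff ways 0 a).mp ha
  have ha1 : a.1 = (k : Int) := by rw [hka]; simp
  rw [ha1, PySem.List.pyGetD_natCast, List.getD_eq_getElem _ _ (by simpa using hk)]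
  simp

-- ===== VERDICT (by name: the statement is the Claim_ definition above) =====
theorem stitch_ways_py_spec : Claim_equal_stitch_ways_py := by
  unfold Claim_equal_stitch_ways_py
  intro ways hdom hpre
  unfold Spec_stitch_ways_py
  cases ways with
  | nil => rw [stitch_ways_py, stitch_ways_py_alt]
  | cons w rest =>
    rw [stitch_ways_py_alt]
    have hseed := seed_loop (w :: rest) (w :: rest).length 0
      (List.replicate (w :: rest).length true) [] (by omega) (by simp)
      (fun j hj => absurd hj (Nat.not_lt_zero j))
    rw [liveP_replicate] at hseed
    rw [Nat.cast_zero] at hseed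
    simpa using hseed.symm
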